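-- pv_equiv track=rewrite | github.com/RescueDiver/arcs4 | reasoning/pattern_rule_engine.py | split_into_row_bands
-- ===== SOURCE A (Python) =====
-- def find_uniform_rows(grid):
--     rows = []
--     for r, row in enumerate(grid):
--         if len(set(row)) == 1:
--             rows.append(r)
--     return rows
--
-- def split_into_row_bands(grid):
--     """
--     Split grid into non-uniform row bands using full uniform rows as separators.
--
--     Example:
--       uniform rows at [0, 5, 10]
--       bands -> [(1,4), (6,9)]
--     """
--     h = len(grid)
--     uniform_rows = set(find_uniform_rows(grid))
--
--     bands = []
--     start = None
--
--     for r in range(h):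
--         if r not in uniform_rows:
--             if start is None:
--                 start = r
--         else:
--             if start is not None:
--                 bands.append((start, r - 1))
--                 start = None
--
--     if start is not None:
--         bands.append((start, h - 1))
--
--     return bands
-- ===== SOURCE B (Python) =====
-- def find_uniform_rows(grid):
--     rows = []
--     for r, row in enumerate(grid):
--         if len(set(row)) == 1:
--             rows.append(r)
--     return rows
--
-- def split_into_row_bands(grid):
--     h = len(grid)
--     seps = [-1] + find_uniform_rows(grid) + [h]
--     bands = []
--     for a, b in zip(seps, seps[1:]):
--         if b - a >= 2:
--             bands.append((a + 1, b - 1))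
--     return bands
-- ===== Notes on version B (the rewrite author's own statement) =====
-- stated objective: alternative
-- what changed: B drops A's running start/None state machine over every row index: it wraps the uniform-row separator list with -1/h sentinels and emits one band per consecutive separator pair with a gap of at least 2.
import Mathlib
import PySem

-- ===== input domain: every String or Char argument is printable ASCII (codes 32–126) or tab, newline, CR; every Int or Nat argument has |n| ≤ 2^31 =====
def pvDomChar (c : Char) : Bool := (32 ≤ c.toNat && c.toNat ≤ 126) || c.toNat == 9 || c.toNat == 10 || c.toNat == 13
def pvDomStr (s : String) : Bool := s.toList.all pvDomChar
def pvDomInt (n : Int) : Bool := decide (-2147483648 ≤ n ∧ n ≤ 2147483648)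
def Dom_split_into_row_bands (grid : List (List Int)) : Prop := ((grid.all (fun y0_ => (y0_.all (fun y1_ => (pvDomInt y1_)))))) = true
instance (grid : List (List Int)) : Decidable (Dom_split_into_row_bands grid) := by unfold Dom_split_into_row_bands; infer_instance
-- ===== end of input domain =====

-- B replaces A's running start/None state machine by iterating over consecutive
-- uniform-row separators wrapped with -1/h sentinels (alternative decomposition, same cost).


-- ===== PORT A =====
-- helper find_uniform_rows: for r, row in enumerate(grid): if len(set(row)) == 1: rows.append(r)
def find_uniform_rows (grid : List (List Int)) : List Int :=
  (PySem.List.enumerate grid 0).foldl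
    (fun rows rr => if (PySem.Set.ofList rr.2).length = 1 then rows ++ [rr.1] else rows) []

-- one iteration of A's loop body (state = (bands, start))
def stepA (uniform_rows : PySem.Set Int) (p : List (Int × Int) × Option Int) (r : Int) :
    List (Int × Int) × Option Int :=
  if !(PySem.Set.contains uniform_rows r) then
    match p.2 with
    | none => (p.1, some r)
    | some _ => p
  else
    match p.2 with
    | some start => (p.1 ++ [(start, r - 1)], none)
    | none => p

def split_into_row_bands (grid : List (List Int)) : List (Int × Int) :=
  let h : Int := grid.length
  let uniform_rows : PySem.Set Int := PySem.Set.ofList (find_uniform_rows grid)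
  let res := (PySem.List.pyRange 0 h 1).foldl (stepA uniform_rows) ([], none)
  match res.2 with
  | some start => res.1 ++ [(start, h - 1)]
  | none => res.1

-- ===== PORT B =====
-- Source B's copy of the helper
def find_uniform_rows_alt (grid : List (List Int)) : List Int :=
  (PySem.List.enumerate grid 0).foldl
    (fun rows rr => if (PySem.Set.ofList rr.2).length = 1 then rows ++ [rr.1] else rows) []

-- one iteration of B's loop body over a separator pair (a, b)
def stepB (bands : List (Int × Int)) (ab : Int × Int) : List (Int × Int) :=
  if ab.2 - ab.1 ≥ 2 then bands ++ [(ab.1 + 1, ab.2 - 1)] else bands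

def split_into_row_bands_alt (grid : List (List Int)) : List (Int × Int) :=
  let h : Int := grid.length
  let seps : List Int := [-1] ++ find_uniform_rows_alt grid ++ [h]
  (seps.zip (PySem.List.slice seps (some 1) none)).foldl stepB []

-- ===== PRECONDITION & SPEC =====
def Spec_split_into_row_bands (grid : List (List Int)) (out : List (Int × Int)) : Prop := out = split_into_row_bands_alt grid
instance (grid : List (List Int)) (out : List (Int × Int)) : Decidable (Spec_split_into_row_bands grid out) := by unfold Spec_split_into_row_bands; infer_instance

-- ===== CLAIM (what is proved, stated in full; the proofs are below) =====
def Claim_equal_split_into_row_bands : Prop := ∀ (grid : List (List Int)), Dom_split_into_row_bands grid → Spec_split_into_row_bands grid (split_into_row_bands grid)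

-- ===== LEMMAS AND PROOFS =====

-- the bands read off a separator list: one band per gap ≥ 2 between consecutive separators
def gapsAux (a : Int) : List Int → List (Int × Int)
  | [] => []
  | s :: ss => (if s - a ≥ 2 then [(a + 1, s - 1)] else []) ++ gapsAux s ss

-- the uniform-row indices selected by a membership test among r, r+1, …, r+n-1
def selAux (memb : Int → Bool) : Nat → Int → List Int
  | 0, _ => []
  | n + 1, r => (if memb r then [r] else []) ++ selAux memb n (r + 1)

-- indices (offset r) of the uniform rows of grid
def furAux : List (List Int) → Int → List Int
  | [], _ => []
  | row :: t, r => (if (PySem.Set.ofList row).length = 1 then [r] else []) ++ furAux t (r + 1)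

theorem fur_foldl (grid : List (List Int)) : ∀ (r : Int) (acc : List Int),
    (PySem.List.enumerate grid r).foldl
      (fun rows rr => if (PySem.Set.ofList rr.2).length = 1 then rows ++ [rr.1] else rows) acc
    = acc ++ furAux grid r := by
  induction grid with
  | nil => intro r acc; simp [PySem.List.enumerate, furAux]
  | cons row t ih =>
    intro r acc
    rw [PySem.List.enumerate_cons]
    simp only [List.foldl_cons, furAux]
    by_cases h : (PySem.Set.ofList row).length = 1 <;> simp [h, ih]

theorem fur_bounds (grid : List (List Int)) : ∀ (r x : Int),
    x ∈ furAux grid r → r ≤ x ∧ x < r + grid.length := by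
  induction grid with
  | nil => intro r x hx; simp [furAux] at hx
  | cons row t ih =>
    intro r x hx
    simp only [furAux, List.mem_append] at hx
    rcases hx with hx | hx
    · split at hx <;> simp at hx
      simp only [List.length_cons]
      push_cast
      omega
    · have := ih (r + 1) x hx
      simp only [List.length_cons] at *
      push_cast at this ⊢
      omega

theorem fur_pairwise (grid : List (List Int)) : ∀ (r : Int),
    (furAux grid r).Pairwise (· < ·) := by
  induction grid with
  | nil => intro r; simp [furAux]
  | cons row t ih =>
    intro r
    simp only [furAux]
    split
    · refine List.Pairwise.cons ?_ (ih (r + 1))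
      intro x hx
      have := fur_bounds t (r + 1) x hx
      omega
    · simpa using ih (r + 1)

-- B's zip-fold computes gapsAux
theorem zip_foldl_gaps (l : List Int) : ∀ (a : Int) (acc : List (Int × Int)),
    (List.zip (a :: l) l).foldl stepB acc = acc ++ gapsAux a l := by
  induction l with
  | nil => intro a acc; simp [gapsAux]
  | cons s t ih =>
    intro a acc
    simp only [List.zip_cons_cons, List.foldl_cons]
    rw [ih s]
    simp only [gapsAux, stepB]
    split <;> simp

-- the membership test reproduces todo when todo is strictly increasing and lives in [r, r+n)
theorem sel_eq (memb : Int → Bool) : ∀ (n : Nat) (r : Int) (todo : List Int),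
    todo.Pairwise (· < ·) →
    (∀ x ∈ todo, r ≤ x ∧ x < r + n) →
    (∀ x : Int, r ≤ x → (memb x = true ↔ x ∈ todo)) →
    selAux memb n r = todo := by
  intro n
  induction n with
  | zero =>
    intro r todo _ hb _
    cases todo with
    | nil => simp [selAux]
    | cons s t => exact absurd (hb s (by simp)) (by push_cast; omega)
  | succ n ih =>
    intro r todo hp hb hm
    cases todo with
    | nil =>
      have hr : memb r = false := by
        by_contra h
        have := (hm r le_rfl).1 (by revert h; cases memb r <;> simp)
        simp at this
      simp only [selAux, hr, Bool.false_eq_true, if_false, List.nil_append]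
      exact ih (r + 1) [] (by simp) (by simp) (fun x hx => by
        rw [hm x (by omega)])
    | cons s t =>
      have hs := hb s (by simp)
      by_cases hsr : s = r
      · subst hsr
        have hr : memb s = true := (hm s le_rfl).2 (by simp)
        simp only [selAux, hr, if_true, List.singleton_append, List.cons.injEq, true_and]
        refine ih (s + 1) t (hp.of_cons) ?_ ?_
        · intro x hx
          have h1 := hb x (by simp [hx])
          have h2 := List.rel_of_pairwise_cons hp hx
          push_cast at h1 ⊢; omega
        · intro x hx
          rw [hm x (by omega)]
          have : x ≠ s := by omega
          simp [this]
      · have hslt : r < s := by omega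
        have hr : memb r = false := by
          by_contra h
          have hmem := (hm r le_rfl).1 (by revert h; cases memb r <;> simp)
          rcases List.mem_cons.mp hmem with h' | h'
          · omega
          · have := List.rel_of_pairwise_cons hp h'; omega
        simp only [selAux, hr, Bool.false_eq_true, if_false, List.nil_append]
        refine ih (r + 1) (s :: t) hp ?_ (fun x hx => hm x (by omega))
        intro x hx
        have h1 := hb x hx
        have : s ≤ x := by
          rcases List.mem_cons.mp hx with h' | h'
          · omega
          · have := List.rel_of_pairwise_cons hp h'; omega
        push_cast at h1 ⊢; omega

-- A's state-machine fold over range [r, r+n) with finalisation equals the gaps of the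
-- selected separators wrapped with the right/left sentinels
theorem mainA (U : PySem.Set Int) : ∀ (n : Nat) (r : Int) (acc : List (Int × Int)) (st : Option Int),
    (∀ s, st = some s → s + 1 ≤ r) →
    (match ((PySem.List.pyRange r (r + n) 1).foldl (stepA U) (acc, st)).2 with
     | some start => ((PySem.List.pyRange r (r + n) 1).foldl (stepA U) (acc, st)).1 ++ [(start, r + n - 1)]
     | none => ((PySem.List.pyRange r (r + n) 1).foldl (stepA U) (acc, st)).1)
    = acc ++ gapsAux (match st with | none => r - 1 | some s => s - 1)
        (selAux (fun x => PySem.Set.contains U x) n r ++ [r + (n : Int)]) := by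
  intro n
  induction n with
  | zero =>
    intro r acc st hst
    rw [PySem.List.pyRange_one_eq_nil (by omega)]
    simp only [List.foldl_nil, selAux, List.nil_append, gapsAux]
    cases st with
    | none => simp
    | some s =>
      have := hst s rfl
      rw [if_pos (by push_cast; omega)]
      norm_num
  | succ n ih =>
    intro r acc st hst
    rw [PySem.List.pyRange_one_cons (by push_cast; omega)]
    simp only [List.foldl_cons]
    have hend : r + ((n : Int) + 1) = (r + 1) + (n : Int) := by ring
    have hsel : selAux (fun x => PySem.Set.contains U x) (n + 1) r
        = (if PySem.Set.contains U r then [r] else []) ++ selAux (fun x => PySem.Set.contains U x) n (r + 1) := rfl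
    cases hUr : PySem.Set.contains U r with
    | false =>
      -- r is not uniform
      cases st with
      | none =>
        have hstep : stepA U (acc, none) r = (acc, some r) := by
          unfold stepA; rw [hUr]; rfl
        rw [hstep]
        push_cast
        rw [hend, ih (r + 1) acc (some r) (by intro s h; cases h; omega)]
        rw [hsel, hUr]
        simp
      | some s =>
        have hsr := hst s rfl
        have hstep : stepA U (acc, some s) r = (acc, some s) := by
          unfold stepA; rw [hUr]; rfl
        rw [hstep]
        push_cast
        rw [hend, ih (r + 1) acc (some s) (by intro s' h; cases h; omega)]
        rw [hsel, hUr]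
        simp
    | true =>
      -- r is uniform: a separator
      cases st with
      | none =>
        have hstep : stepA U (acc, none) r = (acc, none) := by
          unfold stepA; rw [hUr]; rfl
        rw [hstep]
        push_cast
        rw [hend, ih (r + 1) acc none (by intro s h; cases h)]
        rw [hsel, hUr]
        rw [if_pos rfl]
        simp only [List.cons_append, gapsAux]
        rw [if_neg (by omega)]
        simp
      | some s =>
        have hsr := hst s rfl
        have hstep : stepA U (acc, some s) r = (acc ++ [(s, r - 1)], none) := by
          unfold stepA; rw [hUr]; rfl
        rw [hstep]
        push_cast
        rw [hend, ih (r + 1) (acc ++ [(s, r - 1)]) none (by intro s' h; cases h)]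
        rw [hsel, hUr]
        rw [if_pos rfl]
        simp only [List.cons_append, gapsAux]
        rw [if_pos (by omega)]
        norm_num

theorem contains_ofList_iff (us : List Int) (x : Int) :
    PySem.Set.contains (PySem.Set.ofList us) x = true ↔ x ∈ us := by
  rw [PySem.Set.contains_iff, PySem.Set.mem_ofList]

-- ===== VERDICT (by name: the statement is the Claim_ definition above) =====
theorem split_into_row_bands_spec : Claim_equal_split_into_row_bands := by
  intro grid _
  unfold Spec_split_into_row_bands split_into_row_bands split_into_row_bands_alt
  simp only []
  -- identify both helpers with furAux grid 0
  have hfur : find_uniform_rows grid = furAux grid 0 := by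
    unfold find_uniform_rows; rw [fur_foldl]; simp
  have hfur' : find_uniform_rows_alt grid = furAux grid 0 := by
    unfold find_uniform_rows_alt; rw [fur_foldl]; simp
  set h : Int := (grid.length : Int) with hh
  set us : List Int := furAux grid 0 with hus
  -- B side
  rw [hfur', PySem.List.slice_from_one]
  have hb : (([-1] ++ us ++ [h]).zip (([-1] ++ us ++ [h]).tail)).foldl stepB []
      = gapsAux (-1) (us ++ [h]) := by
    have : ([-1] ++ us ++ [h] : List Int) = (-1) :: (us ++ [h]) := by simp
    rw [this]
    simpa using zip_foldl_gaps (us ++ [h]) (-1) []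
  rw [hb]
  -- A side
  rw [hfur]
  have hz : (0 : Int) + (grid.length : Int) = h := by omega
  have ha := mainA (PySem.Set.ofList us) grid.length 0 [] none (by intro s h'; cases h')
  rw [hz] at ha
  rw [ha]
  have hsel : selAux (fun x => PySem.Set.contains (PySem.Set.ofList us) x) grid.length 0 = us := by
    apply sel_eq
    · exact fur_pairwise grid 0
    · intro x hx; have := fur_bounds grid 0 x hx; omega
    · intro x _; exact contains_ofList_iff us x
  rw [hsel]
  norm_num
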